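-- pv_equiv track=rewrite | github.com/yunzz999/wiki-ICM | 3°er Semestre/LP/2025/Laboratorios/Lab 8/2.py | req
-- ===== SOURCE A (Python) =====
-- def req(s):
--     sum=0
--     voc=["A","E","I","O","U"]
--     for i in range(len(s)):
--         if s[i] not in voc:
--             sum+=1
--     if(sum>=4):
--         return True
--     else:
--         return False
-- ===== SOURCE B (Python) =====
-- def req(s):
--     total = sum(s.count(v) for v in ["A", "E", "I", "O", "U"])
--     return (len(s) - total) >= 4
-- ===== Notes on version B (the rewrite author's own statement) =====
-- stated objective: alternative
-- what changed: B counts uppercase vowels with one library scan per vowel letter (sum of s.count(v)) and returns len(s)-total >= 4, instead of A's index loop over the string with a per-character membership test and an explicit accumulator.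
import Mathlib
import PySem

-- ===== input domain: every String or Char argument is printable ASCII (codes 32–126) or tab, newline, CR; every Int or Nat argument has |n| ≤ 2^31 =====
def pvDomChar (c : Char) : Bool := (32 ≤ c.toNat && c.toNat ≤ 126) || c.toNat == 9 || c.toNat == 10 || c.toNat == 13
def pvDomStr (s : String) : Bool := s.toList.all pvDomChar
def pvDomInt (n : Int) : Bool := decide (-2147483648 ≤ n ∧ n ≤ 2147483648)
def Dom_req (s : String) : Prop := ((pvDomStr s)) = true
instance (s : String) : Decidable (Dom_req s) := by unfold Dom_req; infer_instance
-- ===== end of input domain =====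

-- B changes the decomposition: one s.count scan per vowel letter, then len(s) - total >= 4 (alternative, same cost).

-- ===== PORT A =====
def req (s : String) : Bool :=
  let voc : List Char := ['A', 'E', 'I', 'O', 'U']
  let sum : Int :=
    (PySem.List.pyRange 0 (PySem.Str.len s) 1).foldl
      (fun acc i => if ¬ (voc.contains (PySem.List.pyGetD s.toList i ' ')) then acc + 1 else acc) 0
  if sum ≥ 4 then true else false

-- ===== PORT B =====
def req_alt (s : String) : Bool :=
  let total : Int := (["A", "E", "I", "O", "U"].map (fun v => (PySem.Str.count s v : Int))).sum
  decide (PySem.Str.len s - total ≥ 4)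

-- ===== PRECONDITION & SPEC =====
def Spec_req (s : String) (out : Bool) : Prop := out = req_alt s
instance (s : String) (out : Bool) : Decidable (Spec_req s out) := by unfold Spec_req; infer_instance

-- ===== CLAIM (what is proved, stated in full; the proofs are below) =====
def Claim_equal_req : Prop := ∀ (s : String), Dom_req s → Spec_req s (req s)

-- ===== LEMMAS AND PROOFS =====

theorem count_go_singleton (v : Char) (l : List Char) (fuel acc : Nat)
    (h : l.length ≤ fuel) :
    PySem.Chars.count.go [v] fuel l acc = acc + l.count v := by
  induction l generalizing fuel acc with
  | nil => cases fuel <;> simp [PySem.Chars.count.go]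
  | cons c t ih =>
    cases fuel with
    | zero => simp at h
    | succ n =>
      rw [PySem.Chars.count.go]
      simp only [List.isPrefixOf, List.length_cons] at *
      by_cases hc : v = c
      · subst hc
        simp [ih n (acc + 1) (by omega)]
        omega
      · simp [hc, Ne.symm hc, ih n acc (by omega)]

theorem count_singleton (l : List Char) (v : Char) :
    PySem.Chars.count l [v] = l.count v := by
  rw [PySem.Chars.count]
  simp [count_go_singleton v l l.length 0 le_rfl]

theorem sum_vowel_counts (l : List Char) :
    ((['A', 'E', 'I', 'O', 'U'].map (fun v => (l.count v : Int))).sum)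
      = (l.countP (fun c => (['A', 'E', 'I', 'O', 'U'] : List Char).contains c) : Int) := by
  induction l with
  | nil => simp
  | cons c t ih =>
    simp only [List.count_cons, List.countP_cons, List.map, List.sum_cons] at *
    by_cases h1 : c = 'A' <;> by_cases h2 : c = 'E' <;> by_cases h3 : c = 'I' <;>
      by_cases h4 : c = 'O' <;> by_cases h5 : c = 'U' <;>
      simp_all <;> omega

-- ===== VERDICT (by name: the statement is the Claim_ definition above) =====
theorem req_spec : Claim_equal_req := by
  intro s _
  unfold Spec_req req req_alt
  have hA := PySem.List.foldl_pyRange_zero_pyGetD' s.toList (' ')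
    (fun (acc : Int) (c : Char) =>
      if ¬ ((['A', 'E', 'I', 'O', 'U'] : List Char).contains c) then acc + 1 else acc) 0
  simp only [PySem.Str.len_eq, PySem.Str.count_eq, hA, PySem.List.foldl_ite_add_one,
    show ("A" : String).toList = ['A'] from rfl, show ("E" : String).toList = ['E'] from rfl,
    show ("I" : String).toList = ['I'] from rfl, show ("O" : String).toList = ['O'] from rfl,
    show ("U" : String).toList = ['U'] from rfl, count_singleton,
    List.map, List.sum_cons, List.sum_nil]
  have hsum := sum_vowel_counts s.toList
  simp only [List.map, List.sum_cons, List.sum_nil] at hsum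
  have hlen := List.length_eq_countP_add_countP
    (fun c => (['A', 'E', 'I', 'O', 'U'] : List Char).contains c) (l := s.toList)
  split_ifs with h
  · symm; simp only [decide_eq_true_eq]
    simp only [ge_iff_le] at *
    omega
  · symm; simp only [decide_eq_false_iff_not]
    simp only [ge_iff_le] at *
    omega
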